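-- pv_equiv track=rewrite | github.com/aducktyping/algorithms | programming_assignment_4/programming_assignment_4.py | pass_1
-- ===== SOURCE A (Python) =====
-- from collections import defaultdict, Counter
--
-- def pass_1(G, n):
--     '''First DFS pass of the Kosaraju algorithm. Takes a graph (G) in adjacent
--     list form, reverses it, and computes the finishing times of each vertex in
--     a depth-first search. The DFS uses a non-recursive algorithm.'''
--     G_rev = defaultdict(lambda: [])
--     for u, vs in G.items():
--         for v in vs:
--             G_rev[v].append(u)
--     t = 0
--     explored = defaultdict(lambda: False)
--     f_times = {}
--     for i in range(n, 0, -1):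
--         if explored[i]:
--             continue
--         u = i
--         visited = defaultdict(lambda: False)
--         trail = []
--         while True:
--             visited[u] = True
--             try:
--                 v = next(v for v in G_rev[u] if (not explored[v]) and (not visited[v]))
--             except StopIteration:
--                 explored[u] = True
--                 t += 1
--                 f_times[u] = t
--                 try:
--                     u = trail.pop()
--                 except IndexError:
--                     break
--             else:
--                 trail.append(u)
--                 u = v
--
--     return f_times
-- ===== SOURCE B (Python) =====
-- def pass_1(G, n):
--     '''First DFS pass of Kosaraju: finishing times of a DFS on the reversed
--     graph.  Classic iterator-stack DFS: the stack holds (node, iterator over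
--     its remaining unscanned reversed neighbours), so every reversed edge is
--     examined O(1) times overall (O(V+E)) instead of rescanning the whole
--     adjacency list after every return from a child.'''
--     rev_edges = [(v, u) for u, vs in G.items() for v in vs]
--     G_rev = {}
--     for v, u in rev_edges:
--         G_rev.setdefault(v, []).append(u)
--     explored = set()
--     f_times = {}
--     t = 0
--     for i in range(n, 0, -1):
--         if i in explored:
--             continue
--         visited = {i}
--         stack = [(i, iter(G_rev.get(i, [])))]
--         while stack:
--             u, it = stack[-1]
--             for v in it:
--                 if v not in explored and v not in visited:
--                     visited.add(v)
--                     stack.append((v, iter(G_rev.get(v, []))))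
--                     break
--             else:
--                 stack.pop()
--                 explored.add(u)
--                 t += 1
--                 f_times[u] = t
--     return f_times
-- ===== Notes on version B (the rewrite author's own statement) =====
-- stated objective: faster
-- what changed: B replaces A's rescan-from-scratch child search by the classic iterator-stack DFS: the stack holds (node, iterator over the remaining unscanned reversed neighbours), so each reversed edge is examined O(1) times instead of A rescanning the whole adjacency list after every return from a child.
import Mathlib
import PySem

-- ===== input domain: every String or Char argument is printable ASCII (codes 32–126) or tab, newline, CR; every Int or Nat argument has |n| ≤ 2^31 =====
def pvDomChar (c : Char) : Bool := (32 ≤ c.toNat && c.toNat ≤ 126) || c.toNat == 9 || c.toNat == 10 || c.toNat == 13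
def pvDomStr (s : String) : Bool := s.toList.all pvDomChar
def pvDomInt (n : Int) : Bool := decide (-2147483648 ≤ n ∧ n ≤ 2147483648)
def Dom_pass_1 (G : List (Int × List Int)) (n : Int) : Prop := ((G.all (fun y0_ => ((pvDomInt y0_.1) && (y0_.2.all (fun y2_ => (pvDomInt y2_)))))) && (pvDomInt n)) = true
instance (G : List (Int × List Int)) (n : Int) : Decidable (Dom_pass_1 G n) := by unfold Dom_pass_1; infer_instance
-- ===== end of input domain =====

-- B replaces A's rescan-from-scratch child search by the classic iterator-stack DFS
-- (each stack frame keeps the not-yet-scanned suffix of its reversed adjacency list),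
-- so each reversed edge is examined O(1) times. Both ports use the same (provably
-- irrelevant) fuel bound to make the while-loop a total structural recursion.

-- ===== PORT A =====
-- the dict argument G: apply Python's dict key semantics (first position, last value) once
def pvItems (G : List (Int × List Int)) : List (Int × List Int) := (PySem.Dict.ofList G).items

-- fuel for the while-loop: each iteration either pushes (≤ #edges times per root) or
-- finishes a vertex (≤ #edges + 1 times per root), so 2·#edges + 2 never runs out
def pvFuel (G : List (Int × List Int)) : Nat :=
  2 * ((pvItems G).foldl (fun a p => a + p.2.length) 0) + 2

-- G_rev = defaultdict(list); for u, vs in G.items(): for v in vs: G_rev[v].append(u)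
def pvGrevA (G : List (Int × List Int)) : PySem.Dict Int (List Int) :=
  (pvItems G).foldl (fun d p => p.2.foldl (fun d v => d.modify v [] (· ++ [p.1])) d) PySem.Dict.empty

-- A's 'while True' body: rescan G_rev[u] from the start for the first eligible child
def dfsA (Grev : PySem.Dict Int (List Int)) :
    Nat → PySem.Set Int → Int → PySem.Dict Int Int → PySem.Set Int → List Int → Int →
    PySem.Set Int × Int × PySem.Dict Int Int
  | 0, E, t, f, _, _, _ => (E, t, f)
  | fuel+1, E, t, f, V, trail, u =>
    let V' := PySem.Set.add V u
    match (Grev.getD u []).find?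
        (fun v => !(PySem.Set.contains E v) && !(PySem.Set.contains V' v)) with
    | some v => dfsA Grev fuel E t f V' (u :: trail) v
    | none =>
      match trail with
      | [] => (PySem.Set.add E u, t + 1, f.insert u (t + 1))
      | w :: rest => dfsA Grev fuel (PySem.Set.add E u) (t + 1) (f.insert u (t + 1)) V' rest w

def pass_1 (G : List (Int × List Int)) (n : Int) : List (Int × Int) :=
  let Grev := pvGrevA G
  let fuel := pvFuel G
  let res := (PySem.List.pyRange n 0 (-1)).foldl
    (fun (s : PySem.Set Int × Int × PySem.Dict Int Int) i =>
      if PySem.Set.contains s.1 i then s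
      else dfsA Grev fuel s.1 s.2.1 s.2.2 PySem.Set.empty [] i)
    (PySem.Set.empty, 0, PySem.Dict.empty)
  res.2.2.items

-- ===== PORT B =====
-- rev_edges = [(v, u) for u, vs in G.items() for v in vs]
def pvRevEdges (G : List (Int × List Int)) : List (Int × Int) :=
  (pvItems G).flatMap (fun p => p.2.map (fun v => (v, p.1)))

-- for v, u in rev_edges: G_rev.setdefault(v, []).append(u)
def pvGrevB (G : List (Int × List Int)) : PySem.Dict Int (List Int) :=
  (pvRevEdges G).foldl (fun d e => d.modify e.1 [] (· ++ [e.2])) PySem.Dict.empty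

-- the 'for v in it: … break / else' of Source B: advance the top frame's iterator past
-- explored-or-visited vertices; return the first white vertex and the iterator's rest
def skipWhite (E V : PySem.Set Int) : List Int → Option (Int × List Int)
  | [] => none
  | v :: vs =>
    if PySem.Set.contains E v || PySem.Set.contains V v then skipWhite E V vs
    else some (v, vs)

-- Source B's 'while stack' loop; each frame is (node, remaining unscanned neighbours)
def dfsB (Grev : PySem.Dict Int (List Int)) :
    Nat → PySem.Set Int → Int → PySem.Dict Int Int →
    PySem.Set Int → List (Int × List Int) → PySem.Set Int × Int × PySem.Dict Int Int
  | 0, E, t, f, _, _ => (E, t, f)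
  | _+1, E, t, f, _, [] => (E, t, f)
  | fuel+1, E, t, f, V, (u, rem) :: rest =>
    match skipWhite E V rem with
    | some (v, vs) =>
      dfsB Grev fuel E t f (PySem.Set.add V v) ((v, Grev.getD v []) :: (u, vs) :: rest)
    | none => dfsB Grev fuel (PySem.Set.add E u) (t + 1) (f.insert u (t + 1)) V rest

def pass_1_alt (G : List (Int × List Int)) (n : Int) : List (Int × Int) :=
  let Grev := pvGrevB G
  let fuel := pvFuel G
  let res := (PySem.List.pyRange n 0 (-1)).foldl
    (fun (s : PySem.Set Int × Int × PySem.Dict Int Int) i =>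
      if PySem.Set.contains s.1 i then s
      else dfsB Grev fuel s.1 s.2.1 s.2.2 (PySem.Set.add PySem.Set.empty i)
        [(i, Grev.getD i [])])
    (PySem.Set.empty, 0, PySem.Dict.empty)
  res.2.2.items

-- ===== PRECONDITION & SPEC =====
def Spec_pass_1 (G : List (Int × List Int)) (n : Int) (out : List (Int × Int)) : Prop := out = pass_1_alt G n
instance (G : List (Int × List Int)) (n : Int) (out : List (Int × Int)) : Decidable (Spec_pass_1 G n out) := by unfold Spec_pass_1; infer_instance

-- ===== CLAIM (what is proved, stated in full; the proofs are below) =====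
def Claim_equal_pass_1 : Prop := ∀ (G : List (Int × List Int)) (n : Int), Dom_pass_1 G n → Spec_pass_1 G n (pass_1 G n)

-- ===== LEMMAS AND PROOFS =====

lemma setContains_add (s : PySem.Set Int) (y x : Int) :
    PySem.Set.contains (PySem.Set.add s y) x = (PySem.Set.contains s x || x == y) := by
  rw [Bool.eq_iff_iff]
  simp [PySem.Set.mem_add]

-- B's two reversed-graph passes build the same dict A's nested loops build
lemma foldl_flatMap {α β γ : Type} (g : β → List γ) (f : α → γ → α) :
    ∀ (l : List β) (init : α),
    (l.flatMap g).foldl f init = l.foldl (fun a b => (g b).foldl f a) init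
  | [], _ => rfl
  | b :: l, init => by
    simp only [List.flatMap_cons, List.foldl_append, List.foldl_cons]
    exact foldl_flatMap g f l _

lemma pvGrevB_eq (G : List (Int × List Int)) : pvGrevB G = pvGrevA G := by
  unfold pvGrevB pvRevEdges pvGrevA
  rw [foldl_flatMap]
  congr 1
  funext d p
  rw [List.foldl_map]

lemma dfsB_nil (Grev : PySem.Dict Int (List Int)) (fuel : Nat) (E : PySem.Set Int)
    (t : Int) (f : PySem.Dict Int Int) (V : PySem.Set Int) :
    dfsB Grev fuel E t f V [] = (E, t, f) := by
  cases fuel <;> rfl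

-- skipWhite is find? on the remainder, remembering the consumed (non-white) prefix
lemma skipWhite_some (E V : PySem.Set Int) :
    ∀ (l : List Int) (v : Int) (vs : List Int), skipWhite E V l = some (v, vs) →
    ∃ p, l = p ++ v :: vs ∧
      (∀ x ∈ p, (PySem.Set.contains E x || PySem.Set.contains V x) = true) ∧
      (PySem.Set.contains E v || PySem.Set.contains V v) = false
  | [], _, _, h => by simp [skipWhite] at h
  | a :: l, v, vs, h => by
    by_cases ha : (PySem.Set.contains E a || PySem.Set.contains V a) = true
    · rw [skipWhite, if_pos ha] at h
      obtain ⟨p, hp1, hp2, hp3⟩ := skipWhite_some E V l v vs h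
      exact ⟨a :: p, by simp [hp1], by
        intro x hx
        rcases List.mem_cons.mp hx with rfl | hx
        · exact ha
        · exact hp2 x hx, hp3⟩
    · rw [skipWhite, if_neg ha] at h
      injection h with h; injection h with h1 h2; subst h1; subst h2
      exact ⟨[], rfl, by simp, by simpa using ha⟩

lemma skipWhite_find (E V : PySem.Set Int) :
    ∀ l : List Int,
    l.find? (fun v => !(PySem.Set.contains E v || PySem.Set.contains V v))
      = (skipWhite E V l).map Prod.fst
  | [] => rfl
  | a :: l => by
    by_cases ha : (PySem.Set.contains E a || PySem.Set.contains V a) = true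
    · rw [skipWhite, if_pos ha]
      simp only [List.find?, ha, Bool.not_true]
      exact skipWhite_find E V l
    · rw [skipWhite, if_neg ha]
      simp only [List.find?, Bool.eq_false_iff.mpr ha, Bool.not_false, Option.map_some]

lemma find?_append_none {p : Int → Bool} :
    ∀ (pre l : List Int), (∀ x ∈ pre, p x = false) →
    (pre ++ l).find? p = l.find? p
  | [], _, _ => rfl
  | a :: pre, l, h => by
    simp only [List.cons_append, List.find?, h a (List.mem_cons_self)]
    exact find?_append_none pre l (fun x hx => h x (List.mem_cons_of_mem _ hx))

-- the heart of the file: A's rescan of the full adjacency list and B's resumed scan of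
-- the top frame's remainder choose the same child at every step, so the two loops
-- run in lock-step
lemma dfs_eq (Grev : PySem.Dict Int (List Int)) :
    ∀ (fuel : Nat) (E : PySem.Set Int) (t : Int) (f : PySem.Dict Int Int)
      (V V' : PySem.Set Int) (trail : List Int) (stack : List (Int × List Int))
      (u : Int) (rem : List Int),
    (∀ x, PySem.Set.contains V' x = PySem.Set.contains (PySem.Set.add V u) x) →
    (∀ x ∈ trail, PySem.Set.contains V' x = true) →
    stack.map Prod.fst = trail →
    (∀ q ∈ (u, rem) :: stack, ∃ pre, Grev.getD q.1 [] = pre ++ q.2 ∧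
      ∀ x ∈ pre, (PySem.Set.contains E x || PySem.Set.contains V' x) = true) →
    dfsA Grev fuel E t f V trail u = dfsB Grev fuel E t f V' ((u, rem) :: stack) := by
  intro fuel
  induction fuel with
  | zero => intros; rfl
  | succ fuel ih =>
    intro E t f V V' trail stack u rem hV htrail hmap hstk
    have hVu : PySem.Set.contains V' u = true := by
      rw [hV u, setContains_add]; simp
    obtain ⟨pre, hsplit, hpre⟩ := hstk (u, rem) List.mem_cons_self
    -- A's generator predicate equals B's whiteness test
    have hpred : (fun v => !(PySem.Set.contains E v) && !(PySem.Set.contains (PySem.Set.add V u) v))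
        = (fun v => !(PySem.Set.contains E v || PySem.Set.contains V' v)) := by
      funext v; rw [← hV v]
      cases PySem.Set.contains E v <;> cases PySem.Set.contains V' v <;> rfl
    have hfind : (Grev.getD u []).find?
        (fun v => !(PySem.Set.contains E v) && !(PySem.Set.contains (PySem.Set.add V u) v))
        = (skipWhite E V' rem).map Prod.fst := by
      rw [hpred, hsplit, find?_append_none pre rem
        (fun x hx => by rw [Bool.not_eq_false']; exact hpre x hx), skipWhite_find]
    show dfsA Grev (fuel+1) E t f V trail u = dfsB Grev (fuel+1) E t f V' ((u, rem) :: stack)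
    simp only [dfsA, dfsB]
    rw [hfind]
    cases hskip : skipWhite E V' rem with
    | some pr =>
      obtain ⟨v, vs⟩ := pr
      obtain ⟨p2, hp2eq, hp2nw, hvwhite⟩ := skipWhite_some E V' rem v vs hskip
      simp only [Option.map_some]
      apply ih
      · -- visited sets stay pointwise equal
        intro x
        rw [setContains_add, setContains_add, hV x]
      · -- new trail ⊆ new visited
        intro x hx
        rw [setContains_add]
        rcases List.mem_cons.mp hx with rfl | hx
        · rw [hVu, Bool.true_or]
        · rw [htrail x hx, Bool.true_or]
      · simpa using hmap
      · -- frame invariant: consumed prefixes stay explored-or-visited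
        intro q hq
        have hmono : ∀ x, (PySem.Set.contains E x || PySem.Set.contains V' x) = true →
            (PySem.Set.contains E x || PySem.Set.contains (PySem.Set.add V' v) x) = true := by
          intro x hx
          rcases Bool.or_eq_true_iff.mp hx with h | h
          · rw [h, Bool.true_or]
          · rw [setContains_add, h, Bool.true_or, Bool.or_true]
        rcases List.mem_cons.mp hq with rfl | hq
        · exact ⟨[], by simp, by simp⟩
        rcases List.mem_cons.mp hq with rfl | hq
        · refine ⟨pre ++ p2 ++ [v], by simp [hsplit, hp2eq], ?_⟩
          intro x hx
          simp only [List.append_assoc, List.mem_append, List.mem_singleton] at hx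
          rcases hx with hx | hx | rfl
          · exact hmono x (hpre x hx)
          · exact hmono x (hp2nw x hx)
          · rw [setContains_add, beq_self_eq_true, Bool.or_true, Bool.or_true]
        · obtain ⟨p, h1, h2⟩ := hstk q (List.mem_cons_of_mem _ hq)
          exact ⟨p, h1, fun x hx => hmono x (h2 x hx)⟩
    | none =>
      simp only [Option.map_none]
      match trail, stack, hmap, htrail with
      | [], [], _, _ => rw [dfsB_nil]
      | w :: rest, (w', remw) :: stack', hmap, htrail =>
        have hw : w' = w := by simpa using congrArg (fun l => l.headD 0) hmap
        rw [hw] at hstk hmap ⊢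
        apply ih
        · -- w is on the trail, hence already visited: adding it changes nothing
          intro x
          rw [setContains_add, ← hV x]
          by_cases hxw : x = w
          · subst hxw
            rw [htrail x List.mem_cons_self]
            simp
          · simp [hxw]
        · intro x hx; exact htrail x (List.mem_cons_of_mem _ hx)
        · simpa using hmap
        · -- explored only grew
          intro q hq
          obtain ⟨p, h1, h2⟩ := hstk q (List.mem_cons_of_mem _ hq)
          refine ⟨p, h1, ?_⟩
          intro x hx
          rcases Bool.or_eq_true_iff.mp (h2 x hx) with h | h
          · rw [setContains_add, h, Bool.true_or, Bool.true_or]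
          · rw [h, Bool.or_true]

-- ===== VERDICT (by name: the statement is the Claim_ definition above) =====
theorem pass_1_spec : Claim_equal_pass_1 := by
  intro G n _
  unfold Spec_pass_1 pass_1 pass_1_alt
  rw [pvGrevB_eq]
  have hstep : ∀ (s : PySem.Set Int × Int × PySem.Dict Int Int) (i : Int),
      (if PySem.Set.contains s.1 i then s
       else dfsA (pvGrevA G) (pvFuel G) s.1 s.2.1 s.2.2 PySem.Set.empty [] i)
      = (if PySem.Set.contains s.1 i then s
       else dfsB (pvGrevA G) (pvFuel G) s.1 s.2.1 s.2.2 (PySem.Set.add PySem.Set.empty i)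
         [(i, (pvGrevA G).getD i [])]) := by
    intro s i
    refine if_congr Iff.rfl rfl ?_
    apply dfs_eq
    · intro x; rfl
    · intro x hx; cases hx
    · rfl
    · intro q hq
      rcases List.mem_cons.mp hq with rfl | hq
      · exact ⟨[], rfl, by simp⟩
      · cases hq
  have : (PySem.List.pyRange n 0 (-1)).foldl
      (fun (s : PySem.Set Int × Int × PySem.Dict Int Int) i =>
        if PySem.Set.contains s.1 i then s
        else dfsA (pvGrevA G) (pvFuel G) s.1 s.2.1 s.2.2 PySem.Set.empty [] i)
      (PySem.Set.empty, 0, PySem.Dict.empty)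
      = (PySem.List.pyRange n 0 (-1)).foldl
      (fun (s : PySem.Set Int × Int × PySem.Dict Int Int) i =>
        if PySem.Set.contains s.1 i then s
        else dfsB (pvGrevA G) (pvFuel G) s.1 s.2.1 s.2.2 (PySem.Set.add PySem.Set.empty i)
          [(i, (pvGrevA G).getD i [])])
      (PySem.Set.empty, 0, PySem.Dict.empty) := by
    apply PySem.List.foldl_congr_mem
    exact fun acc x _ => hstep acc x
  exact congrArg (fun r => r.2.2.items) this
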